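-- pv_equiv track=rewrite | github.com/LocusLontrime/Python | CodeWars_Rush/_4kyu/Smallest_possible_sum_4kyu.py | solution
-- ===== SOURCE A (Python) =====
-- def solution(a):
--     # smallest possible sum of all numbers in Array
--     length = len(a)
--     elements = set(a)
--
--     # cycling through the elements
--     while len(elements) != 1:
--         max_element = max(elements)
--         elements.remove(max_element)
--         elements.add(max_element - max(elements))
--
--     # all elements are now the same
--     return elements.pop() * length
-- ===== SOURCE B (Python) =====
-- def solution(a):
--     # gcd of all elements (division-based Euclid, folded once over the list) times the length
--     g = a[0]
--     for v in a[1:]: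
--         x, y = g, v
--         while y:
--             x, y = y, x % y
--         g = x
--     return g * len(a)
-- ===== Notes on version B (the rewrite author's own statement) =====
-- stated objective: alternative
-- what changed: Replaces A's subtractive max-elimination loop over a set with a single linear fold of the division-based Euclidean gcd over the list, multiplied by the length.
import Mathlib
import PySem

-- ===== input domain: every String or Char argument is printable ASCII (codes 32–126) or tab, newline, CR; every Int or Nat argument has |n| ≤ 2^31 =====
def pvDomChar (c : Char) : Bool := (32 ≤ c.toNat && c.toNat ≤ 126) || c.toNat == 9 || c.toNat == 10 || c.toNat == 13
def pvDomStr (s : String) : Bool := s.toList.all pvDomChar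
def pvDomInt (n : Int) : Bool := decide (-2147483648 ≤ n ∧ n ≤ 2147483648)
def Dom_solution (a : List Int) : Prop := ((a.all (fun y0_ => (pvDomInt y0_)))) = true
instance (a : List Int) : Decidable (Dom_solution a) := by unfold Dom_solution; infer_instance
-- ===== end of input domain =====

-- B replaces A's subtractive max-elimination over a set by one fold of division-based Euclid times the length (a different algorithm of lower iteration count; no clean timing ratio was measurable, so no speed is claimed).

-- ===== PORT A =====
-- the while loop, with a fuel bound supplied by `solution` (a fuel guard, not an algorithm change)
def solutionLoop (fuel : Nat) (elements : PySem.Set Int) : PySem.Set Int :=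
  match fuel with
  | 0 => elements
  | fuel + 1 =>
    if PySem.Set.len elements ≠ 1 then
      match PySem.List.max? elements (fun y => y) with
      | none => elements                                   -- max(set()) raises ValueError: outside Pre_
      | some maxElement =>
        match PySem.Set.remove? elements maxElement with
        | none => elements                                 -- unreachable: maxElement ∈ elements
        | some rest =>
          match PySem.List.max? rest (fun y => y) with
          | none => rest                                   -- max(set()) raises ValueError: outside Pre_
          | some m2 => solutionLoop fuel (PySem.Set.add rest (maxElement - m2))
    else elements

-- fuel (Σ|aᵢ|)+1 dominates the loop's iteration count on Pre_ inputs (the set's sum strictly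
-- decreases each iteration); after the loop the set is a singleton, so its head is set.pop()
def solution (a : List Int) : Int :=
  let length := PySem.List.len a
  let elements := PySem.Set.ofList a
  let final := solutionLoop ((a.map Int.natAbs).sum + 1) elements
  final.headD 0 * length

-- ===== PORT B =====
-- termination of B's inner `while y: x, y = y, x % y`
theorem pvModAbsLt (x y : Int) (h : ¬ y = 0) : (PySem.Int.mod x y).natAbs < y.natAbs := by
  rcases lt_or_gt_of_ne h with hy | hy
  · have := PySem.Int.mod_neg_bounds x hy; omega
  · have h1 := PySem.Int.mod_nonneg x hy
    have h2 := PySem.Int.mod_lt x hy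
    omega

-- `x, y = g, v; while y: x, y = y, x % y` — B's hand-written Euclid step
def euclid (x y : Int) : Int :=
  if h : y = 0 then x
  -- h is used by decreasing_by
  else euclid y (PySem.Int.mod x y)
termination_by y.natAbs
decreasing_by exact pvModAbsLt x y h

def solution_alt (a : List Int) : Int :=
  match a with
  | [] => 0                                                -- a[0] raises IndexError: outside Pre_
  | g :: rest => rest.foldl euclid g * PySem.List.len a

-- ===== PRECONDITION & SPEC =====
-- Pre_ excludes empty lists (A raises ValueError from max of an empty set, B raises IndexError reading the first element)
-- and lists containing a non-positive element whose elements are not all equal, on which A's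
-- subtractive loop never terminates; on every other input both return.
def Pre_solution (a : List Int) : Prop :=
  a ≠ [] ∧ ((∀ x ∈ a, 0 < x) ∨ (∀ x ∈ a, x = a.headI))
instance (a : List Int) : Decidable (Pre_solution a) := by unfold Pre_solution; infer_instance

def pvWitness_solution : List Int := [6, 4]

def Spec_solution (a : List Int) (out : Int) : Prop := out = solution_alt a
instance (a : List Int) (out : Int) : Decidable (Spec_solution a out) := by unfold Spec_solution; infer_instance

-- ===== CLAIM (what is proved, stated in full; the proofs are below) =====
def Claim_equal_solution : Prop := ∀ (a : List Int), Dom_solution a → Pre_solution a → Spec_solution a (solution a)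

-- ===== LEMMAS AND PROOFS =====

-- gcd of a list of ints, as A's set process and B's fold both compute it
def pvG (s : List Int) : Nat := s.foldl (fun g x => Nat.gcd g x.natAbs) 0

theorem pv_dvd_foldl_gcd_iff (d : Nat) (s : List Int) :
    ∀ g : Nat, (d ∣ s.foldl (fun g x => Nat.gcd g x.natAbs) g ↔ d ∣ g ∧ ∀ x ∈ s, (d : Int) ∣ x) := by
  induction s with
  | nil => simp
  | cons a t ih =>
    intro g
    simp only [List.foldl_cons, ih, Nat.dvd_gcd_iff, List.mem_cons]
    constructor
    · rintro ⟨⟨h1, h2⟩, h3⟩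
      refine ⟨h1, ?_⟩
      rintro x (rfl | hx)
      · exact Int.dvd_natAbs.mp (Int.natCast_dvd_natCast.mpr h2)
      · exact h3 x hx
    · rintro ⟨h1, h2⟩
      exact ⟨⟨h1, Int.natCast_dvd_natCast.mp (Int.dvd_natAbs.mpr (h2 a (Or.inl rfl)))⟩, fun x hx => h2 x (Or.inr hx)⟩

theorem pv_dvd_pvG_iff (d : Nat) (s : List Int) : d ∣ pvG s ↔ ∀ x ∈ s, (d : Int) ∣ x := by
  unfold pvG; rw [pv_dvd_foldl_gcd_iff]; simp

theorem pvG_congr (s t : List Int) (h : ∀ x, x ∈ s ↔ x ∈ t) : pvG s = pvG t := by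
  apply Nat.dvd_antisymm
  · rw [pv_dvd_pvG_iff]; intro x hx
    exact (pv_dvd_pvG_iff (pvG s) s).mp dvd_rfl x ((h x).mpr hx)
  · rw [pv_dvd_pvG_iff]; intro x hx
    exact (pv_dvd_pvG_iff (pvG t) t).mp dvd_rfl x ((h x).mp hx)

theorem pv_gcd_emod (x y : Int) : Int.gcd y (x % y) = Int.gcd x y := by
  apply Nat.dvd_antisymm
  · apply Int.dvd_gcd
    · have h1 : (↑(Int.gcd y (x % y)) : Int) ∣ y := Int.gcd_dvd_left _ _
      have h2 : (↑(Int.gcd y (x % y)) : Int) ∣ x % y := Int.gcd_dvd_right _ _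
      have hx : x = x % y + y * (x / y) := by rw [Int.emod_add_mul_ediv]
      calc (↑(Int.gcd y (x % y)) : Int) ∣ x % y + y * (x / y) := dvd_add h2 (h1.mul_right _)
        _ = x := hx.symm
    · exact Int.gcd_dvd_left _ _
  · apply Int.dvd_gcd
    · exact Int.gcd_dvd_right _ _
    · have h1 : (↑(Int.gcd x y) : Int) ∣ x := Int.gcd_dvd_left _ _
      have h2 : (↑(Int.gcd x y) : Int) ∣ y := Int.gcd_dvd_right _ _
      have hx : x % y = x - y * (x / y) := Int.emod_def x y
      rw [hx]; exact dvd_sub h1 (h2.mul_right _)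

theorem euclid_eq_gcd : ∀ (n : Nat) (x y : Int), y.natAbs ≤ n → 0 ≤ x → 0 ≤ y →
    euclid x y = ((Int.gcd x y : Nat) : Int) := by
  intro n
  induction n with
  | zero =>
    intro x y hn hx hy
    have : y = 0 := by omega
    subst this
    rw [euclid]; simp [Int.gcd, Int.natAbs_of_nonneg hx]
  | succ n ih =>
    intro x y hn hx hy
    rw [euclid]
    by_cases h : y = 0
    · subst h; simp [Int.gcd, Int.natAbs_of_nonneg hx]
    · have hy' : 0 < y := lt_of_le_of_ne hy (Ne.symm h)
      simp only [h, dite_false]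
      rw [PySem.Int.mod_eq_emod_of_pos hy']
      have hlt : (x % y).natAbs < y.natAbs := by
        have := Int.emod_nonneg x h
        have := Int.emod_lt_of_pos x hy'
        omega
      rw [ih y (x % y) (by omega) hy (Int.emod_nonneg x h)]
      rw [pv_gcd_emod]

theorem foldl_euclid_eq (t : List Int) : ∀ g : Int, 0 ≤ g → (∀ x ∈ t, 0 ≤ x) →
    t.foldl euclid g = ((t.foldl (fun n x => Nat.gcd n x.natAbs) g.natAbs : Nat) : Int) := by
  induction t with
  | nil => intro g hg _; simp [Int.natAbs_of_nonneg hg]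
  | cons a t ih =>
    intro g hg hall
    simp only [List.foldl_cons]
    rw [euclid_eq_gcd a.natAbs g a le_rfl hg (hall a (by simp))]
    rw [ih _ (by positivity) (fun x hx => hall x (by simp [hx]))]
    simp [Int.gcd]

-- sum of absolute values: the loop's termination measure
def sumA (s : List Int) : Nat := (s.map Int.natAbs).sum

theorem sumA_add_le (s : PySem.Set Int) (v : Int) : sumA (PySem.Set.add s v) ≤ sumA s + v.natAbs := by
  rw [PySem.Set.add_eq_ite]
  split
  · omega
  · simp [sumA]

theorem sumA_ofList_le (a : List Int) : sumA (PySem.Set.ofList a) ≤ sumA a := by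
  suffices h : ∀ (l : List Int) (s : PySem.Set Int),
      sumA (l.foldl PySem.Set.add s) ≤ sumA s + sumA l by
    have := h a []
    simpa [PySem.Set.ofList_eq_foldl, sumA] using this
  intro l
  induction l with
  | nil => intro s; simp [sumA]
  | cons x t ih =>
    intro s
    have h1 := ih (PySem.Set.add s x)
    have h2 := sumA_add_le s x
    simp only [sumA, List.foldl_cons, List.map_cons, List.sum_cons] at h1 h2 ⊢
    omega

theorem perm_discard (s : PySem.Set Int) (m : Int) (hnd : s.Nodup) (hm : m ∈ s) :
    s.Perm (m :: PySem.Set.discard s m) := by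
  rw [List.perm_ext_iff_of_nodup hnd]
  · intro x
    simp only [List.mem_cons, PySem.Set.mem_discard]
    constructor
    · intro hx; by_cases hxm : x = m
      · exact Or.inl hxm
      · exact Or.inr ⟨hx, hxm⟩
    · rintro (rfl | ⟨hx, _⟩) <;> [exact hm; exact hx]
  · rw [List.nodup_cons]
    exact ⟨by simp [PySem.Set.mem_discard], PySem.Set.nodup_discard s m hnd⟩

theorem loop_eq : ∀ (fuel : Nat) (s : PySem.Set Int), s ≠ [] → s.Nodup → (∀ x ∈ s, 0 < x) →
    sumA s < fuel → solutionLoop fuel s = [((pvG s : Nat) : Int)] := by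
  intro fuel
  induction fuel with
  | zero => intro s _ _ _ h; omega
  | succ fuel ih =>
    intro s hne hnd hpos hfuel
    rw [solutionLoop]
    by_cases hlen : PySem.Set.len s = 1
    · -- singleton: loop exits, s = [x] with x = gcd
      have hl : s.length = 1 := by
        simpa [PySem.Set.len, PySem.List.len] using hlen
      obtain ⟨x, rfl⟩ := List.length_eq_one_iff.mp hl
      rw [if_neg (not_not_intro hlen)]
      have hx : 0 < x := hpos x (by simp)
      have : pvG [x] = x.natAbs := by simp [pvG]
      rw [this]; simp [Int.natAbs_of_nonneg hx.le]
    · rw [if_pos hlen]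
      -- the set has ≥ 2 elements
      have hl2 : 2 ≤ s.length := by
        have h0 : s.length ≠ 0 := by simpa using hne
        have h1 : (s.length : Int) ≠ 1 := by simpa [PySem.Set.len, PySem.List.len] using hlen
        omega
      obtain ⟨m, hmax⟩ : ∃ m, PySem.List.max? s (fun y => y) = some m := by
        cases hq : PySem.List.max? s (fun y => y) with
        | none => exact absurd ((PySem.List.max?_eq_none_iff s _).mp hq) hne
        | some m => exact ⟨m, rfl⟩
      have hmmem : m ∈ s := PySem.List.max?_mem hmax
      have hmle : ∀ y ∈ s, y ≤ m := PySem.List.max?_isMax hmax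
      set s' := PySem.Set.discard s m with hs'
      have hrem : PySem.Set.remove? s m = some s' := PySem.Set.remove?_of_mem hmmem
      have hperm := perm_discard s m hnd hmmem
      have hlen' : s.length = s'.length + 1 := by simpa using hperm.length_eq
      have hne' : s' ≠ [] := by
        intro h; rw [h] at hlen'; simp at hlen'; omega
      obtain ⟨m2, hmax2⟩ : ∃ m2, PySem.List.max? s' (fun y => y) = some m2 := by
        cases hq : PySem.List.max? s' (fun y => y) with
        | none => exact absurd ((PySem.List.max?_eq_none_iff s' _).mp hq) hne'
        | some m2 => exact ⟨m2, rfl⟩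
      have hm2mem' : m2 ∈ s' := PySem.List.max?_mem hmax2
      have hm2mem : m2 ∈ s ∧ m2 ≠ m := (PySem.Set.mem_discard _ _ _).mp hm2mem'
      have hm2pos : 0 < m2 := hpos m2 hm2mem.1
      have hm2lt : m2 < m := lt_of_le_of_ne (hmle m2 hm2mem.1) hm2mem.2
      have hmpos : 0 < m := hpos m hmmem
      set v := m - m2 with hv
      have hvpos : 0 < v := by omega
      set s'' := PySem.Set.add s' v with hs''
      -- invariant for s''
      have hnd' : s'.Nodup := PySem.Set.nodup_discard s m hnd
      have hnd'' : s''.Nodup := PySem.Set.nodup_add s' v hnd'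
      have hmem'' : ∀ y, y ∈ s'' ↔ y ∈ s' ∨ y = v := fun y => PySem.Set.mem_add _ _ _
      have hpos'' : ∀ x ∈ s'', 0 < x := by
        intro x hx
        rcases (hmem'' x).mp hx with hx' | rfl
        · exact hpos x ((PySem.Set.mem_discard _ _ _).mp hx').1
        · exact hvpos
      have hne'' : s'' ≠ [] := by
        intro h
        have := (hmem'' v).mpr (Or.inr rfl)
        rw [h] at this; simp at this
      -- sum strictly decreases
      have hsum_split : sumA s = m.natAbs + sumA s' := by
        have := hperm.map Int.natAbs |>.sum_eq
        simpa [sumA] using this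
      have hsum'' : sumA s'' < sumA s := by
        have h1 := sumA_add_le s' v
        rw [← hs''] at h1
        have h2 : v.natAbs = m.natAbs - m2.natAbs := by omega
        have h3 : 0 < m2.natAbs := by omega
        have h4 : m2.natAbs ≤ m.natAbs := by omega
        omega
      -- gcd preserved
      have hG : pvG s'' = pvG s := by
        apply Nat.dvd_antisymm
        · rw [pv_dvd_pvG_iff]
          intro x hx
          by_cases hxm : x = m
          · rw [hxm]
            have hdvdv : ((pvG s'' : Nat) : Int) ∣ v :=
              (pv_dvd_pvG_iff _ s'').mp dvd_rfl v ((hmem'' v).mpr (Or.inr rfl))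
            have hdvdm2 : ((pvG s'' : Nat) : Int) ∣ m2 :=
              (pv_dvd_pvG_iff _ s'').mp dvd_rfl m2 ((hmem'' m2).mpr (Or.inl hm2mem'))
            have hm' : m = v + m2 := by omega
            rw [hm']; exact dvd_add hdvdv hdvdm2
          · have hx' : x ∈ s' := (PySem.Set.mem_discard _ _ _).mpr ⟨hx, hxm⟩
            exact (pv_dvd_pvG_iff _ s'').mp dvd_rfl x ((hmem'' x).mpr (Or.inl hx'))
        · rw [pv_dvd_pvG_iff]
          intro x hx
          rcases (hmem'' x).mp hx with hx' | rfl
          · exact (pv_dvd_pvG_iff _ s).mp dvd_rfl x ((PySem.Set.mem_discard _ _ _).mp hx').1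
          · have h1 : ((pvG s : Nat) : Int) ∣ m := (pv_dvd_pvG_iff _ s).mp dvd_rfl m hmmem
            have h2 : ((pvG s : Nat) : Int) ∣ m2 := (pv_dvd_pvG_iff _ s).mp dvd_rfl m2 hm2mem.1
            exact dvd_sub h1 h2
      simp only [hmax, hrem, hmax2]
      rw [← hv, ← hs'']
      rw [ih s'' hne'' hnd'' hpos'' (by omega), hG]

-- the all-equal branch: set(a) = {h}, loop exits immediately, fold keeps h
theorem loop_singleton (fuel : Nat) (x : Int) : solutionLoop fuel [x] = [x] := by
  cases fuel with
  | zero => rfl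
  | succ fuel => rw [solutionLoop]; simp [PySem.Set.len]

theorem ofList_const (h : Int) (t : List Int) (hall : ∀ x ∈ t, x = h) :
    PySem.Set.ofList (h :: t) = [h] := by
  rw [PySem.Set.ofList_cons]
  have : PySem.Set.discard (PySem.Set.ofList t) h = [] := by
    rw [List.eq_nil_iff_forall_not_mem]
    intro y hy
    have := (PySem.Set.mem_discard _ _ _).mp hy
    exact this.2 (hall y ((PySem.Set.mem_ofList _ _).mp this.1))
  rw [this]

theorem euclid_self (h : Int) : euclid h h = h := by
  rw [euclid]
  by_cases hz : h = 0
  · simp [hz]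
  · simp only [hz, dite_false]
    have : PySem.Int.mod h h = 0 := (PySem.Int.mod_eq_zero_iff_dvd h h).mpr dvd_rfl
    rw [this, euclid]; simp

theorem foldl_euclid_const (h : Int) (t : List Int) (hall : ∀ x ∈ t, x = h) :
    t.foldl euclid h = h := by
  induction t with
  | nil => rfl
  | cons a t ih =>
    have ha : a = h := hall a (by simp)
    subst ha
    simp only [List.foldl_cons, euclid_self]
    exact ih (fun x hx => hall x (by simp [hx]))

-- ===== VERDICT (by name: the statement is the Claim_ definition above) =====
theorem solution_spec : Claim_equal_solution := by
  intro a _ hpre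
  obtain ⟨hne, hcase⟩ := hpre
  obtain ⟨h, t, rfl⟩ : ∃ h t, a = h :: t := by
    cases a with
    | nil => exact absurd rfl hne
    | cons h t => exact ⟨h, t, rfl⟩
  simp only [Spec_solution, solution, solution_alt]
  rcases hcase with hpos | heq
  · -- all positive: both sides are gcd * length
    have hh : 0 < h := hpos h (by simp)
    set a := h :: t with ha
    have hs0ne : PySem.Set.ofList a ≠ [] := by
      intro hcon
      have : h ∈ PySem.Set.ofList a := (PySem.Set.mem_ofList _ _).mpr (by simp [ha])
      rw [hcon] at this; simp at this
    have hpos0 : ∀ x ∈ PySem.Set.ofList a, 0 < x :=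
      fun x hx => hpos x ((PySem.Set.mem_ofList _ _).mp hx)
    have hfuel : sumA (PySem.Set.ofList a) < (a.map Int.natAbs).sum + 1 := by
      have := sumA_ofList_le a
      simp only [sumA] at this ⊢
      omega
    rw [loop_eq _ _ hs0ne (PySem.Set.nodup_ofList a) hpos0 hfuel]
    rw [pvG_congr (PySem.Set.ofList a) a (fun x => PySem.Set.mem_ofList _ _)]
    simp only [List.headD_cons]
    rw [foldl_euclid_eq t h hh.le (fun x hx => (hpos x (by simp [ha, hx])).le)]
    have : pvG a = t.foldl (fun n x => Nat.gcd n x.natAbs) h.natAbs := by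
      simp [pvG, ha]
    rw [this]
  · -- all equal: set(a) = {h}, both sides are h * length
    simp only [List.headI] at heq
    have hall : ∀ x ∈ t, x = h := fun x hx => heq x (by simp [hx])
    rw [ofList_const h t hall, loop_singleton]
    simp only [List.headD_cons]
    rw [foldl_euclid_const h t hall]
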